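-- pv_equiv track=rewrite | github.com/alishuaib/Celestial-Echo | public/res/audio/fmt.py | rmClip
-- ===== SOURCE A (Python) =====
-- def rmClip(symS,symE,inStr):
--     newStr=""
--     removing=False
--     for c in inStr:
--         if c==symS and not removing:
--             removing=True
--
--         if not removing:
--             newStr+=c
--
--         if c==symE and removing:
--             removing=False
--             symS="Done Clipping"
--     return newStr
-- ===== SOURCE B (Python) =====
-- def rmClip(symS, symE, inStr):
--     i = next((k for k, c in enumerate(inStr) if c == symS), None)
--     if i is None:
--         return inStr
--     j = next((k for k, c in enumerate(inStr[i:], i) if c == symE), None)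
--     if j is None:
--         return inStr[:i]
--     return inStr[:i] + inStr[j+1:]
-- ===== Notes on version B (the rewrite author's own statement) =====
-- stated objective: idiomatic
-- what changed: Replaces the streaming removing-flag state machine with boundary location (first character equal to symS, first character from there on equal to symE) and a single slice splice.
import Mathlib
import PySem

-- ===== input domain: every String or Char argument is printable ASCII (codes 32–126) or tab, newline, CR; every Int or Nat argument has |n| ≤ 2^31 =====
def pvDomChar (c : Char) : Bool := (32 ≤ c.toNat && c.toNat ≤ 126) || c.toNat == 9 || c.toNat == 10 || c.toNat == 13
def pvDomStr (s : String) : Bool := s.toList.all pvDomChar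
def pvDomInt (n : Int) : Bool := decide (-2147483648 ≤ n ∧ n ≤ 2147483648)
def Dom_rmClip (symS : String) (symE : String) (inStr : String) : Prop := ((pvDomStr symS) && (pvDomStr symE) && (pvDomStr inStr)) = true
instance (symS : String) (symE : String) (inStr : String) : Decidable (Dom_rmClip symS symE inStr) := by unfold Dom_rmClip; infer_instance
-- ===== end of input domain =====

-- B replaces A's char-by-char removing-flag state machine by locating the span
-- boundaries (first character equal to each delimiter) and splicing with slices
-- (objective: idiomatic).

-- ===== PORT A =====
-- A's loop state: (current symS, symE, accumulated newStr as a char list, removing flag);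
-- Python's `c == symS` compares the 1-char string `c` with symS, hence `String.ofList [c] = symS`.
def rmClipLoop : List Char → String → String → List Char → Bool → List Char
  | [], _, _, acc, _ => acc
  | c :: rest, symS, symE, acc, removing =>
    let removing1 := if String.ofList [c] = symS ∧ removing = false then true else removing
    let acc1 := if removing1 = false then acc ++ [c] else acc
    if String.ofList [c] = symE ∧ removing1 = true then
      rmClipLoop rest "Done Clipping" symE acc1 false
    else
      rmClipLoop rest symS symE acc1 removing1

def rmClip (symS : String) (symE : String) (inStr : String) : String :=
  String.ofList (rmClipLoop inStr.toList symS symE [] false)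

-- ===== PORT B =====
-- Source B's `next((k for k, c in enumerate(...) if c == sym), None)`: first index (counting
-- from k0) whose character, as a 1-char string, equals sym.
def pvFindChar (sym : String) : List Char → Nat → Option Nat
  | [], _ => none
  | c :: r, k => if String.ofList [c] = sym then some k else pvFindChar sym r (k + 1)

def rmClip_alt (symS : String) (symE : String) (inStr : String) : String :=
  match pvFindChar symS inStr.toList 0 with
  | none => inStr
  | some i =>
    match pvFindChar symE (inStr.toList.drop i) i with
    | none => PySem.Str.slice inStr none (some (i : Int))
    | some j => PySem.Str.slice inStr none (some (i : Int)) ++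
        PySem.Str.slice inStr (some ((j : Int) + 1)) none

-- ===== PRECONDITION & SPEC =====
def Spec_rmClip (symS : String) (symE : String) (inStr : String) (out : String) : Prop := out = rmClip_alt symS symE inStr
instance (symS : String) (symE : String) (inStr : String) (out : String) : Decidable (Spec_rmClip symS symE inStr out) := by unfold Spec_rmClip; infer_instance

-- ===== CLAIM (what is proved, stated in full; the proofs are below) =====
def Claim_equal_rmClip : Prop := ∀ (symS : String) (symE : String) (inStr : String), Dom_rmClip symS symE inStr → Spec_rmClip symS symE inStr (rmClip symS symE inStr)

-- ===== LEMMAS AND PROOFS =====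

-- proof-side reference functions: pvAfter e l drops l through the first e (inclusive);
-- pvChop is the copy-until-s-then-pvAfter composite that rmClipLoop computes.
def pvAfter (e : Char) : List Char → List Char
  | [] => []
  | c :: r => if c = e then r else pvAfter e r

def pvChop (s e : Char) : List Char → List Char
  | [] => []
  | c :: r => if c = s then pvAfter e (c :: r) else c :: pvChop s e r

lemma ofList_eq_iff (l : List Char) (s : String) : String.ofList l = s ↔ s.toList = l :=
  ⟨fun h => by rw [← h, String.toList_ofList], fun h => by rw [← h, String.ofList_toList]⟩

lemma toList_inj {a b : String} (h : a.toList = b.toList) : a = b := by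
  rw [← String.ofList_toList (s := a), h, String.ofList_toList]

lemma single_eq {c e : Char} (h : String.ofList [c] = String.ofList [e]) : c = e := by
  have := congrArg String.toList h
  simpa using this

lemma no_single_of_len {sym : String} (h : sym.toList.length ≠ 1) (c : Char) :
    String.ofList [c] ≠ sym :=
  fun hc => h (by rw [(ofList_eq_iff [c] sym).mp hc]; rfl)

-- ----- A-side characterization -----

lemma loopA_nostart (l : List Char) (symS symE : String) (acc : List Char)
    (h : ∀ c ∈ l, String.ofList [c] ≠ symS) :
    rmClipLoop l symS symE acc false = acc ++ l := by
  induction l generalizing acc with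
  | nil => simp [rmClipLoop]
  | cons c r ih =>
    have hcs := h c (List.mem_cons_self)
    simp [rmClipLoop, hcs, ih (acc ++ [c]) (fun d hd => h d (List.mem_cons_of_mem c hd))]

lemma loopA_removing_noend (l : List Char) (symS symE : String) (acc : List Char)
    (h : ∀ c ∈ l, String.ofList [c] ≠ symE) :
    rmClipLoop l symS symE acc true = acc := by
  induction l generalizing symS with
  | nil => simp [rmClipLoop]
  | cons c r ih =>
    have hce := h c (List.mem_cons_self)
    simp [rmClipLoop, hce, ih symS (fun d hd => h d (List.mem_cons_of_mem c hd))]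

lemma done_len : ("Done Clipping" : String).toList.length ≠ 1 := by decide

lemma loopA_removing_e (l : List Char) (symS : String) (e : Char) (acc : List Char) :
    rmClipLoop l symS (String.ofList [e]) acc true = acc ++ pvAfter e l := by
  induction l generalizing symS with
  | nil => simp [rmClipLoop, pvAfter]
  | cons c r ih =>
    by_cases hce : c = e
    · subst hce
      simp [rmClipLoop, pvAfter, loopA_nostart r _ _ acc (fun d _ => no_single_of_len done_len d)]
    · have hne : ¬ (String.ofList [c] = String.ofList [e]) := fun hc => hce (single_eq hc)
      simp [rmClipLoop, hne, pvAfter, hce, ih]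

lemma loopA_main_e (l : List Char) (s e : Char) (acc : List Char) :
    rmClipLoop l (String.ofList [s]) (String.ofList [e]) acc false = acc ++ pvChop s e l := by
  induction l generalizing acc with
  | nil => simp [rmClipLoop, pvChop]
  | cons c r ih =>
    by_cases hcs : c = s
    · subst hcs
      by_cases hce : c = e
      · subst hce
        simp [rmClipLoop, pvChop, pvAfter,
          loopA_nostart r _ _ acc (fun d _ => no_single_of_len done_len d)]
      · have hne : ¬ (String.ofList [c] = String.ofList [e]) := fun hc => hce (single_eq hc)
        simp [rmClipLoop, hne, pvChop, pvAfter, hce, loopA_removing_e]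
    · have hns : ¬ (String.ofList [c] = String.ofList [s]) := fun hc => hcs (single_eq hc)
      by_cases hce : c = e
      · subst hce
        simp [rmClipLoop, hns, pvChop, hcs, ih]
      · have hne : ¬ (String.ofList [c] = String.ofList [e]) := fun hc => hce (single_eq hc)
        simp [rmClipLoop, hns, hne, pvChop, hcs, ih]

lemma loopA_main_noend (l : List Char) (s : Char) (symE : String) (acc : List Char)
    (h : ∀ c ∈ l, String.ofList [c] ≠ symE) :
    rmClipLoop l (String.ofList [s]) symE acc false =
      acc ++ l.takeWhile (fun c => !decide (c = s)) := by
  induction l generalizing acc with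
  | nil => simp [rmClipLoop]
  | cons c r ih =>
    have hce := h c (List.mem_cons_self)
    have hr : ∀ d ∈ r, String.ofList [d] ≠ symE := fun d hd => h d (List.mem_cons_of_mem c hd)
    by_cases hcs : c = s
    · subst hcs
      simp [rmClipLoop, hce, loopA_removing_noend r _ _ acc hr]
    · have hns : ¬ (String.ofList [c] = String.ofList [s]) := fun hc => hcs (single_eq hc)
      simp [rmClipLoop, hns, hce, hcs, ih _ hr]

-- ----- pvChop / pvAfter vs takeWhile / drop -----

lemma pvAfter_not_mem (e : Char) (m : List Char) (h : e ∉ m) : pvAfter e m = [] := by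
  induction m with
  | nil => rfl
  | cons c r ih =>
    simp only [List.mem_cons, not_or] at h
    simp [pvAfter, Ne.symm h.1, ih h.2]

lemma pvAfter_mem (e : Char) (m : List Char) (h : e ∈ m) :
    pvAfter e m = m.drop ((m.takeWhile (fun c => !decide (c = e))).length + 1) := by
  induction m with
  | nil => cases h
  | cons c r ih =>
    by_cases hce : c = e
    · subst hce; simp [pvAfter]
    · have hr : e ∈ r := (List.mem_cons.mp h).resolve_left (fun h1 => hce h1.symm)
      simp [pvAfter, hce, ih hr]

lemma pvChop_mem (s e : Char) (l : List Char) (h : s ∈ l) :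
    pvChop s e l = l.takeWhile (fun c => !decide (c = s)) ++
      pvAfter e (l.drop ((l.takeWhile (fun c => !decide (c = s))).length)) := by
  induction l with
  | nil => cases h
  | cons c r ih =>
    by_cases hcs : c = s
    · subst hcs; simp [pvChop]
    · have hr : s ∈ r := (List.mem_cons.mp h).resolve_left (fun h1 => hcs h1.symm)
      simp [pvChop, hcs, ih hr]

-- ----- pvFindChar characterization -----

lemma pvFindChar_none (sym : String) (l : List Char) (k : Nat)
    (h : ∀ c ∈ l, String.ofList [c] ≠ sym) : pvFindChar sym l k = none := by
  induction l generalizing k with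
  | nil => rfl
  | cons c r ih =>
    simp [pvFindChar, h c List.mem_cons_self, ih _ (fun d hd => h d (List.mem_cons_of_mem c hd))]

lemma pvFindChar_single (s : Char) (l : List Char) (k : Nat) :
    pvFindChar (String.ofList [s]) l k =
      if s ∈ l then some (k + (l.takeWhile (fun c => !decide (c = s))).length) else none := by
  induction l generalizing k with
  | nil => simp [pvFindChar]
  | cons c r ih =>
    by_cases hcs : c = s
    · subst hcs; simp [pvFindChar]
    · have hns : ¬ (String.ofList [c] = String.ofList [s]) := fun hc => hcs (single_eq hc)
      by_cases hm : s ∈ r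
      · simp [pvFindChar, hns, ih, hm, Ne.symm hcs, hcs]
        omega
      · have : s ∉ c :: r := by simp [hm, Ne.symm hcs]
        simp [pvFindChar, hns, ih, hm, this]

-- ----- slices -----

lemma take_tw (a : Char) (l : List Char) :
    l.take ((l.takeWhile (fun c => !decide (c = a))).length) = l.takeWhile (fun c => !decide (c = a)) :=
  (List.prefix_iff_eq_take.mp (List.takeWhile_prefix _)).symm

lemma slice_prefix_toList (inStr : String) (t : Nat) :
    (PySem.Str.slice inStr none (some (t : Int))).toList = inStr.toList.take t := by
  rw [PySem.Str.toList_slice, PySem.Chars.slice_eq_listSlice, PySem.List.slice_to_natCast]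

lemma slice_suffix_toList (inStr : String) (t : Nat) :
    (PySem.Str.slice inStr (some (t : Int)) none).toList = inStr.toList.drop t := by
  rw [PySem.Str.toList_slice, PySem.Chars.slice_eq_listSlice, PySem.List.slice_from_natCast]

-- ===== VERDICT (by name: the statement is the Claim_ definition above) =====
theorem rmClip_spec : Claim_equal_rmClip := by
  intro symS symE inStr _
  unfold Spec_rmClip rmClip
  by_cases hS : symS.toList.length = 1
  · obtain ⟨s, hs⟩ := List.length_eq_one_iff.mp hS
    have hsymS : symS = String.ofList [s] := by rw [← hs, String.ofList_toList]
    subst hsymS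
    set l := inStr.toList with hld
    by_cases hm : s ∈ l
    · set t := (l.takeWhile (fun c => !decide (c = s))).length with htd
      by_cases hE : symE.toList.length = 1
      · obtain ⟨e, he⟩ := List.length_eq_one_iff.mp hE
        have hsymE : symE = String.ofList [e] := by rw [← he, String.ofList_toList]
        subst hsymE
        by_cases hme : e ∈ l.drop t
        · set k := ((l.drop t).takeWhile (fun c => !decide (c = e))).length with hkd
          have hB : rmClip_alt (String.ofList [s]) (String.ofList [e]) inStr =
              PySem.Str.slice inStr none (some (t : Int)) ++
                PySem.Str.slice inStr (some (((t + k : Nat) : Int) + 1)) none := by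
            simp [rmClip_alt, pvFindChar_single, ← hld, hm, hme, ← htd, ← hkd]
          rw [hB]
          apply toList_inj
          rw [String.toList_ofList, String.toList_append, loopA_main_e l s e []]
          simp only [List.nil_append]
          rw [pvChop_mem s e l hm, ← htd, pvAfter_mem e (l.drop t) hme, ← hkd,
            slice_prefix_toList, ← hld, take_tw]
          have hcast : ((t + k : Nat) : Int) + 1 = ((t + k + 1 : Nat) : Int) := by push_cast; ring
          rw [hcast, slice_suffix_toList, ← hld, List.drop_drop, ← Nat.add_assoc]
        · have hB : rmClip_alt (String.ofList [s]) (String.ofList [e]) inStr =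
              PySem.Str.slice inStr none (some (t : Int)) := by
            simp [rmClip_alt, pvFindChar_single, ← hld, hm, hme, ← htd]
          rw [hB]
          apply toList_inj
          rw [String.toList_ofList, loopA_main_e l s e []]
          simp only [List.nil_append]
          rw [pvChop_mem s e l hm, ← htd, pvAfter_not_mem e (l.drop t) hme,
            slice_prefix_toList, ← hld, take_tw, List.append_nil]
      · have hnoE : ∀ c ∈ l.drop t, String.ofList [c] ≠ symE :=
          fun c _ => no_single_of_len hE c
        have hB : rmClip_alt (String.ofList [s]) symE inStr =
            PySem.Str.slice inStr none (some (t : Int)) := by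
          simp [rmClip_alt, pvFindChar_single, ← hld, hm, ← htd,
            pvFindChar_none symE (l.drop t) t hnoE]
        rw [hB]
        apply toList_inj
        rw [String.toList_ofList, loopA_main_noend l s symE [] (fun c _ => no_single_of_len hE c)]
        rw [slice_prefix_toList, ← hld, take_tw]
        simp
    · have hB : rmClip_alt (String.ofList [s]) symE inStr = inStr := by
        simp [rmClip_alt, pvFindChar_single, ← hld, hm]
      rw [hB]
      apply toList_inj
      have hno : ∀ c ∈ l, String.ofList [c] ≠ String.ofList [s] := by
        intro c hc h1
        have hcs : c = s := single_eq h1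
        exact hm (hcs ▸ hc)
      rw [String.toList_ofList, loopA_nostart l _ symE [] hno]
      simpa using hld
  · have hno : ∀ c ∈ inStr.toList, String.ofList [c] ≠ symS := fun c _ => no_single_of_len hS c
    have hB : rmClip_alt symS symE inStr = inStr := by
      simp [rmClip_alt, pvFindChar_none symS inStr.toList 0 hno]
    rw [hB]
    apply toList_inj
    rw [String.toList_ofList, loopA_nostart inStr.toList symS symE [] hno]
    simp
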